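-- pv_equiv track=rewrite | github.com/BoyuanJackChen/code-cascading | review/specific/16B.py | trim_with_stopwords
-- ===== SOURCE A (Python) =====
-- def trim_with_stopwords(outputs, stopwords, original_prompt) -> str:
--     result = []
--     len_prompt = len(original_prompt)
--     for output in outputs:
--         answer = output[len_prompt:]
--         # Delete "<|endoftext|>" in answer, if it is in it
--         if "<|endoftext|>" in answer:
--             answer = answer.replace("<|endoftext|>", "")
--         min_i = len(answer)
--         for w in sorted(stopwords, reverse=True):
--             for i in range(len(answer)):
--                 if answer[i:].startswith(w) and min_i > i:
--                     min_i = i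
--         answer = answer[:min_i]
--         result.append(answer)
--     return result
-- ===== SOURCE B (Python) =====
-- def trim_with_stopwords(outputs, stopwords, original_prompt):
--     def trim_one(output):
--         answer = output[len(original_prompt):]
--         if "<|endoftext|>" in answer:
--             answer = answer.replace("<|endoftext|>", "")
--         # single left-to-right scan: cut at the first position where any stopword starts
--         for i in range(len(answer)):
--             if any(answer.startswith(w, i) for w in stopwords):
--                 return answer[:i]
--         return answer
--     return [trim_one(output) for output in outputs]
-- ===== Notes on version B (the rewrite author's own statement) =====
-- stated objective: faster
-- what changed: Replaces the sorted stopword-by-stopword full rescan (every position rescanned once per stopword, tracking a running minimum) by a single left-to-right scan over positions that stops at the first position where any stopword matches.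
import Mathlib
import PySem

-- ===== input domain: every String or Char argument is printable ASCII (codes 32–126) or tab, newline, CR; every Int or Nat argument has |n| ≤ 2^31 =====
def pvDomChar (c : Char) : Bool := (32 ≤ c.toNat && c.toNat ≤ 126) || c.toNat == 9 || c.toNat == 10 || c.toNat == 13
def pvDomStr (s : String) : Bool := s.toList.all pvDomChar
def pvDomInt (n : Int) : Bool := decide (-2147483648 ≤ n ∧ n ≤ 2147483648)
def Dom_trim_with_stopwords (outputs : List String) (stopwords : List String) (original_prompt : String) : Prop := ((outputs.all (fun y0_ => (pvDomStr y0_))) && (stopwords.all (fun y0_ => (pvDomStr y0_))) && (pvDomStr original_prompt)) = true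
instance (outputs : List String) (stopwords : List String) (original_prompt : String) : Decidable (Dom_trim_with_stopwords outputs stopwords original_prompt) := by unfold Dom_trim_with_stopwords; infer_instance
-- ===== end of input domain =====

-- B replaces A's sorted per-stopword full rescan by one left-to-right scan that stops
-- at the first position where any stopword matches (early exit, no sort).

-- ===== PORT A =====
def trim_with_stopwords (outputs : List String) (stopwords : List String) (original_prompt : String) : List String :=
  let len_prompt : Int := PySem.Str.len original_prompt
  outputs.foldl (fun result output =>
    let answer := PySem.Str.slice output (some len_prompt) none
    let answer := if PySem.Str.isIn "<|endoftext|>" answer then PySem.Str.replace answer "<|endoftext|>" "" else answer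
    let min_i : Int := PySem.Str.len answer
    let min_i := (PySem.List.sorted stopwords (fun x => x) true).foldl (fun min_i w =>
        (PySem.List.pyRange 0 (PySem.Str.len answer)).foldl (fun min_i i =>
          if PySem.Str.startswith (PySem.Str.slice answer (some i) none) w && decide (min_i > i) then i else min_i) min_i) min_i
    result ++ [PySem.Str.slice answer none (some min_i)]) []

-- ===== PORT B =====
-- answer.startswith(w, i) for some stopword w
def pvAnyAt (stopwords : List String) (answer : String) (i : Nat) : Bool :=
  stopwords.any (fun w => PySem.Chars.startswith (answer.toList.drop i) w.toList)

-- the 'for i in range(len(answer)) … return answer[:i]' loop with its early exit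
def pvScan (stopwords : List String) (answer : String) : Nat → List Char → String
  | _, [] => answer
  | i, _ :: rest =>
    if pvAnyAt stopwords answer i then PySem.Str.slice answer none (some (i : Int))
    else pvScan stopwords answer (i + 1) rest

def trim_with_stopwords_alt (outputs : List String) (stopwords : List String) (original_prompt : String) : List String :=
  outputs.map (fun output =>
    let answer := PySem.Str.slice output (some (PySem.Str.len original_prompt)) none
    let answer := if PySem.Str.isIn "<|endoftext|>" answer then PySem.Str.replace answer "<|endoftext|>" "" else answer
    pvScan stopwords answer 0 answer.toList)

-- ===== PRECONDITION & SPEC =====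
def Spec_trim_with_stopwords (outputs : List String) (stopwords : List String) (original_prompt : String) (out : List String) : Prop := out = trim_with_stopwords_alt outputs stopwords original_prompt
instance (outputs : List String) (stopwords : List String) (original_prompt : String) (out : List String) : Decidable (Spec_trim_with_stopwords outputs stopwords original_prompt out) := by unfold Spec_trim_with_stopwords; infer_instance

-- ===== CLAIM (what is proved, stated in full; the proofs are below) =====
def Claim_equal_trim_with_stopwords : Prop := ∀ (outputs : List String) (stopwords : List String) (original_prompt : String), Dom_trim_with_stopwords outputs stopwords original_prompt → Spec_trim_with_stopwords outputs stopwords original_prompt (trim_with_stopwords outputs stopwords original_prompt)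

-- ===== LEMMAS AND PROOFS =====

-- first index ≥ s hit by P within the next k positions
def pvFirstHit (P : Nat → Bool) : Nat → Nat → Option Nat
  | _, 0 => none
  | s, k + 1 => if P s then some s else pvFirstHit P (s + 1) k

theorem pvFirstHit_some_ge (P : Nat → Bool) : ∀ (k s j : Nat), pvFirstHit P s k = some j → s ≤ j := by
  intro k
  induction k with
  | zero => intro s j h; simp [pvFirstHit] at h
  | succ k ih =>
    intro s j h
    simp only [pvFirstHit] at h
    split at h
    · cases h; omega
    · have := ih (s + 1) j h; omega

theorem pvFirstHit_false : ∀ (k s : Nat), pvFirstHit (fun _ => false) s k = none := by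
  intro k; induction k with
  | zero => intro s; rfl
  | succ k ih => intro s; simp [pvFirstHit, ih]

-- B's scan computes the first hit of pvAnyAt
theorem pvScan_eq (ws : List String) (answer : String) :
    ∀ (l : List Char) (i : Nat), pvScan ws answer i l =
      (match pvFirstHit (pvAnyAt ws answer) i l.length with
       | some j => PySem.Str.slice answer none (some (j : Int))
       | none => answer) := by
  intro l
  induction l with
  | nil => intro i; rfl
  | cons c t ih =>
    intro i
    simp only [pvScan, List.length_cons, pvFirstHit]
    by_cases h : pvAnyAt ws answer i
    · simp [h]
    · simp [h, ih (i + 1)]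

-- A's inner loop computes min of the state and the first hit of w's predicate
theorem pvInner (P : Nat → Bool) : ∀ (k s : Nat) (m : Int),
    (List.range' s k).foldl (fun m i => if P i && decide (m > (i : Int)) then (i : Int) else m) m =
      (match pvFirstHit P s k with
       | some j => min m (j : Int)
       | none => m) := by
  intro k
  induction k with
  | zero => intro s m; rfl
  | succ k ih =>
    intro s m
    rw [List.range'_succ]
    simp only [List.foldl_cons, pvFirstHit]
    by_cases h : P s
    · have hstep : (if P s && decide (m > (s : Int)) then (s : Int) else m) = min m (s : Int) := by
        simp only [h, Bool.true_and, decide_eq_true_eq]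
        rw [min_def]; split_ifs <;> omega
      rw [hstep, ih, if_pos h]
      cases hf : pvFirstHit P (s + 1) k with
      | none => rfl
      | some j =>
        have hj := pvFirstHit_some_ge P k (s + 1) j hf
        have hle : min m (s : Int) ≤ (j : Int) :=
          le_trans (min_le_right _ _) (by exact_mod_cast Nat.le_of_lt (by omega))
        simp only [min_eq_left hle]
    · have hstep : ∀ mm : Int, (if P s && decide (mm > (s : Int)) then (s : Int) else mm) = mm := by
        intro mm; simp [h]
      rw [hstep, ih, if_neg (by simp [h])]

def pvQ (answer : String) (w : String) (i : Nat) : Bool :=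
  PySem.Chars.startswith (answer.toList.drop i) w.toList

def pvHit (answer : String) (w : String) : Int :=
  (pvFirstHit (pvQ answer w) 0 answer.toList.length).elim ((answer.toList.length : Int)) (fun j => (j : Int))

-- replace the match-form step by 'min m (pvHit w)' as long as the state stays ≤ len
theorem pvOuter (answer : String) : ∀ (ws : List String) (m : Int), m ≤ (answer.toList.length : Int) →
    ws.foldl (fun m w =>
      (match pvFirstHit (pvQ answer w) 0 answer.toList.length with
       | some j => min m (j : Int)
       | none => m)) m
    = ws.foldl (fun m w => min m (pvHit answer w)) m := by
  intro ws
  induction ws with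
  | nil => intro m _; rfl
  | cons w t ih =>
    intro m hm
    simp only [List.foldl_cons]
    have hstep : (match pvFirstHit (pvQ answer w) 0 answer.toList.length with
       | some j => min m (j : Int)
       | none => m) = min m (pvHit answer w) := by
      unfold pvHit
      cases pvFirstHit (pvQ answer w) 0 answer.toList.length with
      | none => simp only [Option.elim_none]; exact (min_eq_left hm).symm
      | some j => simp only [Option.elim_some]
    rw [hstep, ih (min m (pvHit answer w)) (le_trans (min_le_left _ _) hm)]

theorem pvPull (answer : String) : ∀ (l : List String) (a b : Int),
    l.foldl (fun m w => min m (pvHit answer w)) (min a b) =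
      min a (l.foldl (fun m w => min m (pvHit answer w)) b) := by
  intro l
  induction l with
  | nil => intro a b; rfl
  | cons w t ih =>
    intro a b
    simp only [List.foldl_cons, min_assoc]
    exact ih a (min b (pvHit answer w))

-- min of two first-hit values is the first-hit value of the disjunction
theorem pvMinElim (P R : Nat → Bool) : ∀ (k s : Nat),
    min ((pvFirstHit P s k).elim (((s + k : Nat) : Int)) (fun j => (j : Int)))
        ((pvFirstHit R s k).elim (((s + k : Nat) : Int)) (fun j => (j : Int)))
      = (pvFirstHit (fun i => P i || R i) s k).elim (((s + k : Nat) : Int)) (fun j => (j : Int)) := by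
  intro k
  induction k with
  | zero => intro s; simp [pvFirstHit]
  | succ k ih =>
    intro s
    simp only [pvFirstHit]
    by_cases hP : P s
    · have hx : ((s : Nat) : Int) ≤ (pvFirstHit R s (k + 1)).elim (((s + (k + 1) : Nat) : Int)) (fun j => (j : Int)) := by
        cases hf : pvFirstHit R s (k + 1) with
        | none => simp only [Option.elim_none]; push_cast; omega
        | some j =>
          have := pvFirstHit_some_ge R (k + 1) s j hf
          simp only [Option.elim_some]; omega
      simp only [pvFirstHit, hP, if_true] at hx ⊢
      simp only [Bool.true_or, if_true, Option.elim_some]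
      exact min_eq_left hx
    · by_cases hR : R s
      · have hx : ((s : Nat) : Int) ≤ (pvFirstHit P (s + 1) k).elim (((s + (k + 1) : Nat) : Int)) (fun j => (j : Int)) := by
          cases hf : pvFirstHit P (s + 1) k with
          | none => simp only [Option.elim_none]; push_cast; omega
          | some j =>
            have := pvFirstHit_some_ge P k (s + 1) j hf
            simp only [Option.elim_some]; omega
        simp only [hP, hR, Bool.false_or, if_true, Option.elim_some]
        exact min_eq_right hx
      · simp only [hP, hR, Bool.false_or]
        have := ih (s + 1)
        have harith : s + 1 + k = s + (k + 1) := by omega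
        rw [harith] at this
        exact this

theorem pvUnion (answer : String) : ∀ (ws : List String),
    ws.foldl (fun m w => min m (pvHit answer w)) ((answer.toList.length : Int)) =
      (pvFirstHit (pvAnyAt ws answer) 0 answer.toList.length).elim ((answer.toList.length : Int)) (fun j => (j : Int)) := by
  intro ws
  induction ws with
  | nil =>
    have hfun : pvAnyAt [] answer = fun _ => false := by
      funext i; simp [pvAnyAt]
    simp [List.foldl_nil, hfun, pvFirstHit_false]
  | cons w t ih =>
    simp only [List.foldl_cons]
    rw [min_comm, pvPull, ih]
    have hfun : pvAnyAt (w :: t) answer = fun i => pvQ answer w i || pvAnyAt t answer i := by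
      funext i; simp [pvAnyAt, pvQ, List.any_cons]
    rw [hfun]
    have := pvMinElim (pvQ answer w) (pvAnyAt t answer) answer.toList.length 0
    simp only [Nat.zero_add] at this
    unfold pvHit
    exact this

-- folding with append of singletons is map
theorem pvFoldlAppend {α β : Type} (f : α → β) : ∀ (l : List α) (acc : List β),
    l.foldl (fun r o => r ++ [f o]) acc = acc ++ l.map f := by
  intro l
  induction l with
  | nil => intro acc; simp
  | cons x t ih => intro acc; simp [ih]

-- per-output agreement
theorem pvOne (ws : List String) (answer : String) :
    PySem.Str.slice answer none (some
      ((PySem.List.sorted ws (fun x => x) true).foldl (fun min_i w =>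
        (PySem.List.pyRange 0 (PySem.Str.len answer)).foldl (fun min_i i =>
          if PySem.Str.startswith (PySem.Str.slice answer (some i) none) w && decide (min_i > i) then i else min_i) min_i)
        (PySem.Str.len answer)))
    = pvScan ws answer 0 answer.toList := by
  have hn : PySem.Str.len answer = ((answer.toList.length : Nat) : Int) := PySem.Str.len_eq answer
  -- the inner loop, rewritten through pvInner
  have hfun : (fun (min_i : Int) (w : String) =>
      (PySem.List.pyRange 0 ((answer.toList.length : Nat) : Int)).foldl (fun min_i i =>
        if PySem.Str.startswith (PySem.Str.slice answer (some i) none) w && decide (min_i > i) then i else min_i) min_i)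
      = (fun (m : Int) (w : String) =>
      (match pvFirstHit (pvQ answer w) 0 answer.toList.length with
       | some j => min m (j : Int)
       | none => m)) := by
    funext m w
    rw [PySem.List.pyRange_zero_natCast, List.foldl_map, List.range_eq_range']
    rw [← pvInner (pvQ answer w) answer.toList.length 0 m]
    apply PySem.List.foldl_congr_mem
    intro mm i _
    have hq : PySem.Str.startswith (PySem.Str.slice answer (some (i : Int)) none) w = pvQ answer w i := by
      rw [PySem.Str.startswith_eq]
      unfold pvQ
      rw [PySem.Str.toList_slice, PySem.Chars.slice_eq_listSlice, PySem.List.slice_from_natCast]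
    rw [hq]
  rw [hn, hfun]
  rw [pvOuter answer _ _ (le_refl _)]
  rw [(PySem.List.sorted_perm ws (fun x => x) true).foldl_eq'
    (by intro x _ y _ z; exact min_right_comm z (pvHit answer x) (pvHit answer y))]
  rw [pvUnion answer ws]
  rw [pvScan_eq ws answer answer.toList 0]
  cases hf : pvFirstHit (pvAnyAt ws answer) 0 answer.toList.length with
  | some j => rfl
  | none =>
    simp only [Option.elim_none]
    apply String.toList_inj.mp
    rw [PySem.Str.toList_slice, PySem.Chars.slice_eq_listSlice, PySem.List.slice_to_natCast, List.take_length]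

-- ===== VERDICT (by name: the statement is the Claim_ definition above) =====
theorem trim_with_stopwords_spec : Claim_equal_trim_with_stopwords := by
  intro outputs stopwords original_prompt _
  unfold Spec_trim_with_stopwords trim_with_stopwords trim_with_stopwords_alt
  simp only []
  rw [pvFoldlAppend]
  simp only [List.nil_append]
  apply List.map_congr_left
  intro output _
  exact pvOne stopwords _
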